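-- pv_equiv track=rewrite | github.com/NeoDemos/NeoDemos | pipeline/financial_ingestor.py | _strip_markdown_tables
-- ===== SOURCE A (Python) =====
-- def _strip_markdown_tables(text: str) -> str:
--     """Remove Markdown table blocks from text so we don't double-count them.
--
--     A Markdown table is a block of lines where each line starts with '|'.
--     """
--     lines = text.splitlines()
--     out = []
--     in_table = False
--
--     for line in lines:
--         stripped = line.strip()
--         if stripped.startswith("|") and "|" in stripped[1:]:
--             in_table = True
--             continue
--         if in_table and not stripped:
--             # Blank line after table — end of table block
--             in_table = False
--             continue
--         if in_table:
--             # Non-table line immediately after table lines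
--             in_table = False
--         out.append(line)
--
--     return "\n".join(out)
-- ===== SOURCE B (Python) =====
-- def _strip_markdown_tables(text: str) -> str:
--     """Remove Markdown table blocks from text so we don't double-count them."""
--     lines = text.splitlines()
--     n = len(lines)
--     out = []
--     i = 0
--     while i < n:
--         s = lines[i].strip()
--         if s.startswith("|") and "|" in s[1:]:
--             # skip the whole run of consecutive table lines
--             i += 1
--             while i < n and _is_table_line(lines[i]):
--                 i += 1
--             # consume exactly one blank line ending the table block
--             if i < n and lines[i].strip() == "":
--                 i += 1
--         else:
--             out.append(lines[i])
--             i += 1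
--     return "\n".join(out)
--
--
-- def _is_table_line(line: str) -> bool:
--     s = line.strip()
--     return s.startswith("|") and "|" in s[1:]
-- ===== Notes on version B (the rewrite author's own statement) =====
-- stated objective: alternative
-- what changed: Replaces the carried in_table state flag with an index loop that finds each table block, skips its consecutive table lines with an inner while, then consumes exactly one trailing blank line.
import Mathlib
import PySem

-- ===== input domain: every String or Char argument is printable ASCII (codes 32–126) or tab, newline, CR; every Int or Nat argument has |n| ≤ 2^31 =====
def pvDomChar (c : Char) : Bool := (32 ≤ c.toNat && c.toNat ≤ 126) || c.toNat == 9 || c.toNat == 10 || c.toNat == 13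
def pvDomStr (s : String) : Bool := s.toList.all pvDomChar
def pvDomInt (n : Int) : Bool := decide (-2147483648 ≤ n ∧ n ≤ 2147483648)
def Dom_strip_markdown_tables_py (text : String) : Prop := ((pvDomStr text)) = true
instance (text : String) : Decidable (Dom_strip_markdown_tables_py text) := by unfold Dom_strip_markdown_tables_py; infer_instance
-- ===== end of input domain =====

-- B replaces A's carried in_table flag with a block-find-and-skip traversal; same cost, different decomposition.

-- ===== PORT A =====
-- literal transliteration of A's for-loop with state (out, in_table)
def strip_markdown_tables_py (text : String) : String :=
  let lines := PySem.Str.splitlines text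
  let res := lines.foldl (fun (st : List String × Bool) line =>
    let stripped := PySem.Str.strip line
    if PySem.Str.startswith stripped "|" && PySem.Str.isIn "|" (PySem.Str.slice stripped (some 1) none) then
      (st.1, true)
    else if st.2 && stripped == "" then
      (st.1, false)
    else
      (st.1 ++ [line], false)) ([], false)
  PySem.Str.join "\n" res.1

-- ===== PORT B =====
-- Source B's helper _is_table_line
def pvIsTableLineB (line : String) : Bool :=
  let s := PySem.Str.strip line
  PySem.Str.startswith s "|" && PySem.Str.isIn "|" (PySem.Str.slice s (some 1) none)

-- Source B's outer while loop: skip a run of table lines (inner while = dropWhile), then one blank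
def pvGoB : List String → List String
  | [] => []
  | l :: rest =>
    if pvIsTableLineB l then
      match hr : rest.dropWhile pvIsTableLineB with
      | [] => []
      | b :: rest' =>
        if PySem.Str.strip b == "" then pvGoB rest' else pvGoB (b :: rest')
    else l :: pvGoB rest
  termination_by ls => ls.length
  decreasing_by
    · have h := List.length_dropWhile_le pvIsTableLineB rest
      rw [hr] at h; simp at h ⊢; omega
    · have h := List.length_dropWhile_le pvIsTableLineB rest
      rw [hr] at h; simp at h ⊢; omega
    · simp

def strip_markdown_tables_py_alt (text : String) : String :=
  PySem.Str.join "\n" (pvGoB (PySem.Str.splitlines text))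

-- ===== PRECONDITION & SPEC =====
def Spec_strip_markdown_tables_py (text : String) (out : String) : Prop := out = strip_markdown_tables_py_alt text
instance (text : String) (out : String) : Decidable (Spec_strip_markdown_tables_py text out) := by unfold Spec_strip_markdown_tables_py; infer_instance

-- ===== CLAIM (what is proved, stated in full; the proofs are below) =====
def Claim_equal_strip_markdown_tables_py : Prop := ∀ (text : String), Dom_strip_markdown_tables_py text → Spec_strip_markdown_tables_py text (strip_markdown_tables_py text)

-- ===== LEMMAS AND PROOFS =====

-- A's loop body, named (definitionally equal to the lambda in port A)
def pvStepA (st : List String × Bool) (line : String) : List String × Bool :=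
  if pvIsTableLineB line then (st.1, true)
  else if st.2 && (PySem.Str.strip line == "") then (st.1, false)
  else (st.1 ++ [line], false)

-- A's loop, extracted as recursion on the line list with the in_table flag
def pvAuxA : List String → Bool → List String
  | [], _ => []
  | l :: ls, t =>
    if pvIsTableLineB l then pvAuxA ls true
    else if t && (PySem.Str.strip l == "") then pvAuxA ls false
    else l :: pvAuxA ls false

-- the value of pvGoB after the head of a table run has been skipped
def pvSkipB (ls : List String) : List String :=
  match ls.dropWhile pvIsTableLineB with
  | [] => []
  | b :: rest' => if PySem.Str.strip b == "" then pvGoB rest' else pvGoB (b :: rest')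

theorem pvLamA_eq : (fun (st : List String × Bool) line =>
    let stripped := PySem.Str.strip line
    if PySem.Str.startswith stripped "|" && PySem.Str.isIn "|" (PySem.Str.slice stripped (some 1) none) then
      (st.1, true)
    else if st.2 && stripped == "" then
      (st.1, false)
    else
      (st.1 ++ [line], false)) = pvStepA := by
  funext st line
  simp only [pvStepA, pvIsTableLineB]
  rfl

theorem pvGoB_nil : pvGoB [] = [] := by rw [pvGoB]

theorem pvGoB_table (l : String) (ls : List String) (h : pvIsTableLineB l = true) :
    pvGoB (l :: ls) = pvSkipB ls := by
  rw [pvGoB, if_pos h, pvSkipB]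
  cases hd : ls.dropWhile pvIsTableLineB with
  | nil => rfl
  | cons b r => rfl

theorem pvGoB_nontable (l : String) (ls : List String) (h : pvIsTableLineB l = false) :
    pvGoB (l :: ls) = l :: pvGoB ls := by
  rw [pvGoB, if_neg (by simp [h])]

theorem pvFoldl_eq_auxA (lines : List String) : ∀ (out : List String) (t : Bool),
    (lines.foldl pvStepA (out, t)).1 = out ++ pvAuxA lines t := by
  induction lines with
  | nil => intro out t; simp [pvAuxA]
  | cons l ls ih =>
    intro out t
    rw [List.foldl_cons]
    cases h1 : pvIsTableLineB l with
    | true =>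
      rw [show pvStepA (out, t) l = (out, true) by rw [pvStepA, if_pos h1], ih]
      rw [pvAuxA, if_pos h1]
    | false =>
      cases h2 : (t && (PySem.Str.strip l == "")) with
      | true =>
        rw [show pvStepA (out, t) l = (out, false) by
              rw [pvStepA, if_neg (by simp [h1]), if_pos h2], ih]
        rw [pvAuxA, if_neg (by simp [h1]), if_pos h2]
      | false =>
        rw [show pvStepA (out, t) l = (out ++ [l], false) by
              rw [pvStepA, if_neg (by simp [h1]), if_neg (by simp [h2])], ih]
        rw [pvAuxA, if_neg (by simp [h1]), if_neg (by simp [h2])]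
        simp

theorem pvAuxA_eq_goB (ls : List String) :
    pvAuxA ls false = pvGoB ls ∧ pvAuxA ls true = pvSkipB ls := by
  induction ls with
  | nil =>
    refine ⟨by rw [pvAuxA, pvGoB_nil], ?_⟩
    rw [pvAuxA]; rfl
  | cons l ls ih =>
    cases h1 : pvIsTableLineB l with
    | true =>
      refine ⟨?_, ?_⟩
      · rw [pvGoB_table l ls h1, pvAuxA, if_pos h1, ih.2]
      · rw [pvAuxA, if_pos h1, ih.2, pvSkipB, pvSkipB, List.dropWhile_cons_of_pos h1]
    | false =>
      have hd : (l :: ls).dropWhile pvIsTableLineB = l :: ls :=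
        List.dropWhile_cons_of_neg (by simp [h1])
      refine ⟨?_, ?_⟩
      · rw [pvGoB_nontable l ls h1, pvAuxA, if_neg (by simp [h1]),
           if_neg (by simp), ih.1]
      · rw [pvAuxA, if_neg (by simp [h1]), pvSkipB, hd]
        have hm : (match l :: ls with
            | [] => ([] : List String)
            | b :: rest' => if PySem.Str.strip b == "" then pvGoB rest' else pvGoB (b :: rest')) =
            if PySem.Str.strip l == "" then pvGoB ls else pvGoB (l :: ls) := rfl
        rw [hm]
        cases h2 : (PySem.Str.strip l == "") with
        | true => rw [if_pos rfl]; exact ih.1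
        | false => simp [pvGoB_nontable l ls h1, ih.1]

-- ===== VERDICT (by name: the statement is the Claim_ definition above) =====
theorem strip_markdown_tables_py_spec : Claim_equal_strip_markdown_tables_py := by
  intro text _
  unfold Spec_strip_markdown_tables_py strip_markdown_tables_py strip_markdown_tables_py_alt
  rw [pvLamA_eq]
  show PySem.Str.join "\n" (List.foldl pvStepA ([], false) (PySem.Str.splitlines text)).1 =
    PySem.Str.join "\n" (pvGoB (PySem.Str.splitlines text))
  rw [pvFoldl_eq_auxA, (pvAuxA_eq_goB _).1]
  simp
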